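-- pv_equiv track=rewrite | github.com/quant1x/q1x-base | q1x/core/w1.py | find_monotonic_peaks_left_v2
-- ===== SOURCE A (Python) =====
-- def find_monotonic_peaks_left_v2(data_list):
--     """左侧单调上升波峰检测"""
--     if not data_list:
--         return []
--
--     PL = []
--     prev = data_list[0]
--
--     for current in data_list[1:]:
--         if current > prev:
--             prev = current
--         elif PL and prev == PL[-1]:  # 关键优化：避免重复添加相同的峰值
--             continue
--         else:
--             PL.append(prev)
--
--     # 处理最后一个元素
--     if not PL or prev > PL[-1]:
--         PL.append(prev)
--
--     return PL
-- ===== SOURCE B (Python) =====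
-- def find_monotonic_peaks_left_v2(data_list):
--     """左侧单调上升波峰检测 (prefix-max table + run-length decomposition)"""
--     if not data_list:
--         return []
--
--     # 1) running-maximum table
--     maxima = []
--     m = data_list[0]
--     for x in data_list:
--         if x > m:
--             m = x
--         maxima.append(m)
--
--     # 2) run-length encode the (non-decreasing) maxima
--     runs = []
--     for v in maxima:
--         if runs and runs[-1][0] == v:
--             runs[-1] = (v, runs[-1][1] + 1)
--         else:
--             runs.append((v, 1))
--
--     # 3) peaks = values held for at least two positions
--     PL = [v for v, c in runs if c >= 2]
--
--     # 4) the overall maximum closes the list if not already there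
--     if not PL or PL[-1] != maxima[-1]:
--         PL.append(maxima[-1])
--     return PL
-- ===== Notes on version B (the rewrite author's own statement) =====
-- stated objective: alternative
-- what changed: Replaced A's single streaming loop with last-element dedup by a three-phase decomposition: build the prefix-maximum table, run-length encode it, keep values of runs of length >= 2, then append the overall maximum if missing.
import Mathlib
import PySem

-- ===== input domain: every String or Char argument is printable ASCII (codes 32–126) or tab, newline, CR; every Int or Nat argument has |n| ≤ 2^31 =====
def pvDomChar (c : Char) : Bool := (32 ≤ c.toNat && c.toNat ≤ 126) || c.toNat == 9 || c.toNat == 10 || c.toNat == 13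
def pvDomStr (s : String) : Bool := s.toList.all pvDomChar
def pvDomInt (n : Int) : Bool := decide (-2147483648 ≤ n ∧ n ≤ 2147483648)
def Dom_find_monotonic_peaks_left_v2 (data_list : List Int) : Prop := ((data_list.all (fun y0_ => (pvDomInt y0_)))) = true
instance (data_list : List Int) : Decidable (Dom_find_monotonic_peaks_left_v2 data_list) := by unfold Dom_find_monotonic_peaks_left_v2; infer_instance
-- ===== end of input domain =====

-- B replaces A's streaming dedup loop by a prefix-max table + run-length-encoding decomposition (alternative, same O(n) cost).

-- ===== PORT A =====
-- the for-loop of A: state (PL, prev)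
def pvALoop : List Int → List Int → Int → List Int × Int
  | [], PL, prev => (PL, prev)
  | current :: rest, PL, prev =>
    if current > prev then pvALoop rest PL current
    else
      match PL.getLast? with
      | some l => if prev = l then pvALoop rest PL prev
                  else pvALoop rest (PL ++ [prev]) prev
      | none => pvALoop rest (PL ++ [prev]) prev

def find_monotonic_peaks_left_v2 (data_list : List Int) : List Int :=
  match data_list with
  | [] => []
  | d0 :: rest =>
    let s := pvALoop rest [] d0
    match s.1.getLast? with
    | none => s.1 ++ [s.2]
    | some l => if s.2 > l then s.1 ++ [s.2] else s.1

-- ===== PORT B =====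
-- the prefix-max loop of B (m starts at data_list[0], runs over all of data_list)
def pvPM : List Int → Int → List Int
  | [], _ => []
  | x :: xs, m => let m' := if x > m then x else m; m' :: pvPM xs m'

-- one step of B's run-length-encoding loop (inspects/updates the last run)
def pvRLEStep (runs : List (Int × Int)) (v : Int) : List (Int × Int) :=
  match runs.getLast? with
  | some (w, c) => if w = v then runs.dropLast ++ [(v, c + 1)] else runs ++ [(v, 1)]
  | none => runs ++ [(v, 1)]

def find_monotonic_peaks_left_v2_alt (data_list : List Int) : List Int :=
  match data_list with
  | [] => []
  | d0 :: rest =>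
    let maxima := pvPM (d0 :: rest) d0
    let runs := maxima.foldl pvRLEStep []
    let PL := (runs.filter (fun p => 2 ≤ p.2)).map Prod.fst
    match maxima.getLast? with
    | none => PL            -- unreachable: maxima is nonempty here
    | some ml =>
      match PL.getLast? with
      | none => PL ++ [ml]
      | some l => if l ≠ ml then PL ++ [ml] else PL

-- ===== PRECONDITION & SPEC =====
def Spec_find_monotonic_peaks_left_v2 (data_list : List Int) (out : List Int) : Prop := out = find_monotonic_peaks_left_v2_alt data_list
instance (data_list : List Int) (out : List Int) : Decidable (Spec_find_monotonic_peaks_left_v2 data_list out) := by unfold Spec_find_monotonic_peaks_left_v2; infer_instance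

-- ===== CLAIM (what is proved, stated in full; the proofs are below) =====
def Claim_equal_find_monotonic_peaks_left_v2 : Prop := ∀ (data_list : List Int), Dom_find_monotonic_peaks_left_v2 data_list → Spec_find_monotonic_peaks_left_v2 data_list (find_monotonic_peaks_left_v2 data_list)

-- ===== LEMMAS AND PROOFS =====

-- the running maximum after consuming a list, starting from m
def pvFMax : List Int → Int → Int
  | [], m => m
  | x :: xs, m => pvFMax xs (if x > m then x else m)

-- reference peak stream; s = "the current max has already been emitted"
def pvPk : List Int → Int → Bool → List Int
  | [], _, _ => []
  | x :: xs, m, s =>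
    if x > m then pvPk xs x false
    else if s then pvPk xs m true
    else m :: pvPk xs m true

-- front-recursive run-length encoding of a stream, current run (w, c)
def pvRleF : List Int → Int → Int → List (Int × Int)
  | [], w, c => [(w, c)]
  | x :: xs, w, c => if x = w then pvRleF xs w (c + 1) else (w, c) :: pvRleF xs x 1

theorem pvFoldl_rle (xs : List Int) : ∀ (runs : List (Int × Int)) (w c : Int),
    List.foldl pvRLEStep (runs ++ [(w, c)]) xs = runs ++ pvRleF xs w c := by
  induction xs with
  | nil => intro runs w c; simp [pvRleF]
  | cons x xs ih =>
    intro runs w c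
    simp only [List.foldl_cons, pvRLEStep, List.getLast?_concat, List.dropLast_concat, pvRleF]
    by_cases h : w = x
    · simp [h, ih]
    · rw [if_neg h, if_neg (fun e => h e.symm)]
      rw [ih (runs ++ [(w, c)]) x 1, List.append_assoc, List.singleton_append]

theorem pvPM_last (xs : List Int) : ∀ m : Int,
    (m :: pvPM xs m).getLast? = some (pvFMax xs m) := by
  induction xs with
  | nil => intro m; simp [pvPM, pvFMax]
  | cons x xs ih => intro m; simp [pvPM, pvFMax, List.getLast?_cons_cons, ih]

theorem pvRle_filter (xs : List Int) : ∀ (m c : Int), 1 ≤ c →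
    ((pvRleF (pvPM xs m) m c).filter (fun p => 2 ≤ p.2)).map Prod.fst
      = if 2 ≤ c then m :: pvPk xs m true else pvPk xs m false := by
  induction xs with
  | nil =>
    intro m c _
    by_cases h : (2 : Int) ≤ c <;>
      simp only [pvPM, pvRleF, pvPk, List.filter, h, decide_true, decide_false,
        List.map_cons, List.map_nil] <;> simp
  | cons x xs ih =>
    intro m c hc
    by_cases hx : x > m
    · have hxm : ¬ x = m := by omega
      have h1 := ih x 1 (by omega)
      simp only [if_neg (by omega : ¬ (2:Int) ≤ 1)] at h1
      by_cases h2 : (2 : Int) ≤ c <;>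
        simp [pvPM, hx, pvRleF, hxm, pvPk, h1, h2]
    · have h1 := ih m (c + 1) (by omega)
      simp only [if_pos (by omega : (2:Int) ≤ c + 1)] at h1
      by_cases h2 : (2 : Int) ≤ c <;>
        simp [pvPM, hx, pvRleF, pvPk, h1, h2]

theorem pvALoop_pk (xs : List Int) : ∀ (PL : List Int) (prev : Int),
    (PL.getLast? = some prev → pvALoop xs PL prev = (PL ++ pvPk xs prev true, pvFMax xs prev)) ∧
    ((∀ l, PL.getLast? = some l → l < prev) → pvALoop xs PL prev = (PL ++ pvPk xs prev false, pvFMax xs prev)) := by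
  induction xs with
  | nil => intro PL prev; constructor <;> intro _ <;> simp [pvALoop, pvPk, pvFMax]
  | cons x xs ih =>
    intro PL prev
    constructor
    · intro h
      by_cases hx : x > prev
      · have := (ih PL x).2 (by intro l hl; rw [h] at hl; injection hl with e; omega)
        simp [pvALoop, hx, pvPk, pvFMax, this]
      · have := (ih PL prev).1 h
        simp [pvALoop, hx, h, pvPk, pvFMax, this]
    · intro h
      by_cases hx : x > prev
      · have := (ih PL x).2 (by intro l hl; have := h l hl; omega)
        simp [pvALoop, hx, pvPk, pvFMax, this]
      · have happ := (ih (PL ++ [prev]) prev).1 (by simp)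
        rw [List.append_assoc] at happ
        cases hL : PL.getLast? with
        | none => simp [pvALoop, hx, hL, pvPk, pvFMax, happ]
        | some l =>
          have : ¬ prev = l := by have := h l hL; omega
          simp [pvALoop, hx, hL, this, pvPk, pvFMax, happ]

theorem pvLe_fmax (xs : List Int) : ∀ m : Int, m ≤ pvFMax xs m := by
  induction xs with
  | nil => intro m; simp [pvFMax]
  | cons x xs ih =>
    intro m
    simp only [pvFMax]
    by_cases hx : x > m
    · simp only [if_pos hx]; have := ih x; omega
    · simp only [if_neg hx]; exact ih m

theorem pvMem_pk_le (xs : List Int) : ∀ (m : Int) (s : Bool) (y : Int),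
    y ∈ pvPk xs m s → y ≤ pvFMax xs m := by
  induction xs with
  | nil => intro m s y hy; simp [pvPk] at hy
  | cons x xs ih =>
    intro m s y hy
    by_cases hx : x > m
    · simp only [pvPk, if_pos hx] at hy
      simpa [pvFMax, hx] using ih x false y hy
    · cases s with
      | true =>
        simp only [pvPk, if_neg hx] at hy
        simpa [pvFMax, hx] using ih m true y hy
      | false =>
        simp [pvPk, hx] at hy
        rcases hy with h | h
        · rw [h]; simpa [pvFMax, hx] using pvLe_fmax xs m
        · simpa [pvFMax, hx] using ih m true y h

-- ===== VERDICT (by name: the statement is the Claim_ definition above) =====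
theorem find_monotonic_peaks_left_v2_spec : Claim_equal_find_monotonic_peaks_left_v2 := by
  intro data_list _
  unfold Spec_find_monotonic_peaks_left_v2
  cases data_list with
  | nil => rfl
  | cons d0 rest =>
    have hA := (pvALoop_pk rest [] d0).2 (by intro l hl; simp at hl)
    have hpm0 : pvPM (d0 :: rest) d0 = d0 :: pvPM rest d0 := by simp [pvPM]
    have hfold : List.foldl pvRLEStep [] (d0 :: pvPM rest d0) = pvRleF (pvPM rest d0) d0 1 := by
      have := pvFoldl_rle (pvPM rest d0) [] d0 1
      simpa [pvRLEStep] using this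
    have hfilter := pvRle_filter rest d0 1 (by omega)
    simp only [if_neg (by omega : ¬ (2:Int) ≤ 1)] at hfilter
    simp only [find_monotonic_peaks_left_v2, find_monotonic_peaks_left_v2_alt, hA,
      hpm0, hfold, hfilter, pvPM_last rest d0, List.nil_append]
    cases hL : (pvPk rest d0 false).getLast? with
    | none => simp
    | some l =>
      have hmem : l ∈ pvPk rest d0 false := List.mem_of_getLast? hL
      have hle : l ≤ pvFMax rest d0 := pvMem_pk_le rest d0 false l hmem
      dsimp only
      by_cases hgt : pvFMax rest d0 > l
      · rw [if_pos hgt, if_pos (by omega : l ≠ pvFMax rest d0)]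
      · rw [if_neg hgt, if_neg (by omega : ¬ l ≠ pvFMax rest d0)]
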